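-- pv_equiv track=rewrite | github.com/xuancong84/OpenSmartLight | tools/server/lib/NLP.py | parse_outfn
-- ===== SOURCE A (Python) =====
-- def parse_outfn(L, tmp_dir):
-- 	out_fn = ''
-- 	for L1 in L.splitlines():
-- 		if L1.startswith('[download] ') and L1.endswith(' has already been downloaded'):
-- 			out_fn = L1[11:-28]
-- 		elif tmp_dir in L1:
-- 			out_fn = L1[L1.find(tmp_dir):].strip()
-- 	return out_fn
-- ===== SOURCE B (Python) =====
-- def parse_outfn(L, tmp_dir):
-- 	for L1 in reversed(L.splitlines()):
-- 		if L1.startswith('[download] ') and L1.endswith(' has already been downloaded'):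
-- 			return L1[11:-28]
-- 		elif tmp_dir in L1:
-- 			return L1[L1.find(tmp_dir):].strip()
-- 	return ''
-- ===== Notes on version B (the rewrite author's own statement) =====
-- stated objective: alternative
-- what changed: Replaces A's forward pass that keeps overwriting an accumulator with a reverse-order early-return scan that stops at the first (i.e. last) matching line.
import Mathlib
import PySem

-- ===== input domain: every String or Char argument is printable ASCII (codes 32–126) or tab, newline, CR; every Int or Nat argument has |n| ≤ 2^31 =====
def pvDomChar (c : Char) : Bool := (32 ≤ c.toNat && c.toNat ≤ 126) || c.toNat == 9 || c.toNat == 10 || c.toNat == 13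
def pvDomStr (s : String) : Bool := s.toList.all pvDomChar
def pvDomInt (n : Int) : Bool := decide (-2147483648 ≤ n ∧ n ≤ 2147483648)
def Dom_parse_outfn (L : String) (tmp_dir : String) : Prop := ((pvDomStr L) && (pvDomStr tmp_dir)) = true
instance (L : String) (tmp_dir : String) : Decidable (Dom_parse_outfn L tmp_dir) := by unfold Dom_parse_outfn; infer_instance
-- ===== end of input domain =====

-- B replaces A's forward overwrite-accumulator pass by a reverse-order early-return scan (alternative decomposition, same cost).

-- ===== PORT A =====
def parse_outfn (L : String) (tmp_dir : String) : String :=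
  (PySem.Str.splitlines L).foldl
    (fun out_fn L1 =>
      if PySem.Str.startswith L1 "[download] " &&
         PySem.Str.endswith L1 " has already been downloaded" then
        PySem.Str.slice L1 (some 11) (some (-28))
      else if PySem.Str.isIn tmp_dir L1 then
        PySem.Str.strip (PySem.Str.slice L1 (some (PySem.Str.find L1 tmp_dir)) none)
      else out_fn)
    ""

-- ===== PORT B =====
-- the reverse early-return loop of Source B
def pvGoB (tmp_dir : String) : List String → String
  | [] => ""
  | L1 :: rest =>
      if PySem.Str.startswith L1 "[download] " &&
         PySem.Str.endswith L1 " has already been downloaded" then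
        PySem.Str.slice L1 (some 11) (some (-28))
      else if PySem.Str.isIn tmp_dir L1 then
        PySem.Str.strip (PySem.Str.slice L1 (some (PySem.Str.find L1 tmp_dir)) none)
      else pvGoB tmp_dir rest

def parse_outfn_alt (L : String) (tmp_dir : String) : String :=
  pvGoB tmp_dir (PySem.Str.splitlines L).reverse

-- ===== PRECONDITION & SPEC =====
def Spec_parse_outfn (L : String) (tmp_dir : String) (out : String) : Prop := out = parse_outfn_alt L tmp_dir
instance (L : String) (tmp_dir : String) (out : String) : Decidable (Spec_parse_outfn L tmp_dir out) := by unfold Spec_parse_outfn; infer_instance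

-- ===== CLAIM (what is proved, stated in full; the proofs are below) =====
def Claim_equal_parse_outfn : Prop := ∀ (L : String) (tmp_dir : String), Dom_parse_outfn L tmp_dir → Spec_parse_outfn L tmp_dir (parse_outfn L tmp_dir)

-- ===== LEMMAS AND PROOFS =====

-- pvGoB with a custom value returned when no line matches
def pvGoW (tmp_dir init : String) : List String → String
  | [] => init
  | L1 :: rest =>
      if PySem.Str.startswith L1 "[download] " &&
         PySem.Str.endswith L1 " has already been downloaded" then
        PySem.Str.slice L1 (some 11) (some (-28))
      else if PySem.Str.isIn tmp_dir L1 then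
        PySem.Str.strip (PySem.Str.slice L1 (some (PySem.Str.find L1 tmp_dir)) none)
      else pvGoW tmp_dir init rest

theorem pvGoB_eq_pvGoW (tmp_dir : String) (ys : List String) :
    pvGoB tmp_dir ys = pvGoW tmp_dir "" ys := by
  induction ys with
  | nil => rfl
  | cons y ys ih => simp [pvGoB, pvGoW, ih]

theorem pvGoW_append (tmp_dir init : String) (ys : List String) (l : String) :
    pvGoW tmp_dir init (ys ++ [l]) =
      pvGoW tmp_dir
        (if PySem.Str.startswith l "[download] " &&
            PySem.Str.endswith l " has already been downloaded" then
          PySem.Str.slice l (some 11) (some (-28))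
        else if PySem.Str.isIn tmp_dir l then
          PySem.Str.strip (PySem.Str.slice l (some (PySem.Str.find l tmp_dir)) none)
        else init) ys := by
  induction ys with
  | nil => simp [pvGoW]
  | cons y ys ih => simp [pvGoW, ih]

theorem pvFoldl_eq_pvGoW (tmp_dir : String) (ys : List String) :
    ∀ init : String,
      ys.foldl
        (fun out_fn L1 =>
          if PySem.Str.startswith L1 "[download] " &&
             PySem.Str.endswith L1 " has already been downloaded" then
            PySem.Str.slice L1 (some 11) (some (-28))
          else if PySem.Str.isIn tmp_dir L1 then
            PySem.Str.strip (PySem.Str.slice L1 (some (PySem.Str.find L1 tmp_dir)) none)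
          else out_fn)
        init = pvGoW tmp_dir init ys.reverse := by
  induction ys with
  | nil => intro init; rfl
  | cons y ys ih =>
      intro init
      simp only [List.foldl_cons, List.reverse_cons, pvGoW_append]
      exact ih _

-- ===== VERDICT (by name: the statement is the Claim_ definition above) =====
theorem parse_outfn_spec : Claim_equal_parse_outfn := by
  intro L tmp_dir _
  unfold Spec_parse_outfn parse_outfn parse_outfn_alt
  rw [pvFoldl_eq_pvGoW, pvGoB_eq_pvGoW]
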